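-- pv_equiv track=rewrite | github.com/jyotigupta3/pythonProject | coding_problem.py | reverse_each_word
-- ===== SOURCE A (Python) =====
-- import string
--
-- def reverse_each_word(sentence):
--     words = sentence.split(" ")
--     rev_word = []
--
--     for word in words:
--         l = []
--         for char in word:
--             if char in string.punctuation:
--                 l.append(char)
--             else:
--                 l.insert(0, char)
--         word = "".join(l)
--         rev_word.append(word)
--
--     return " ".join(rev_word)
-- ===== SOURCE B (Python) =====
-- import string
--
-- _PUNCT = frozenset(string.punctuation)
--
-- def reverse_each_word(sentence):
--     def rev(word):
--         letters = [c for c in word if c not in _PUNCT]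
--         puncts = [c for c in word if c in _PUNCT]
--         return "".join(reversed(letters)) + "".join(puncts)
--     return " ".join(rev(w) for w in sentence.split(" "))
-- ===== Notes on version B (the rewrite author's own statement) =====
-- stated objective: faster
-- what changed: Replaced the per-character l.insert(0, char) loop (quadratic per word) with a single-pass partition of each word into letters and punctuation, joining reversed letters plus punctuation.
import Mathlib
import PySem

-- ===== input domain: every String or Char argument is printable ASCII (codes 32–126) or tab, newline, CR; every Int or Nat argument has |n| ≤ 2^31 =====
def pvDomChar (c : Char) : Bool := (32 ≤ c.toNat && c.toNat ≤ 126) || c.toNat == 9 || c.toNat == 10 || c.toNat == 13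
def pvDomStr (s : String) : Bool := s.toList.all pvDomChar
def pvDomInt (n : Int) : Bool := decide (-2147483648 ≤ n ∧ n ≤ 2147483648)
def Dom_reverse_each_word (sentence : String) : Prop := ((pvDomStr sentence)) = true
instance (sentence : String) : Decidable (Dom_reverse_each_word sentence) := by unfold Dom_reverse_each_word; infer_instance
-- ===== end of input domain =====

-- B replaces the quadratic insert-at-front loop by a one-pass partition into letters and punctuation (faster).

-- string.punctuation
def pvPunct : List Char := "!\"#$%&'()*+,-./:;<=>?@[\\]^_`{|}~".toList

-- ===== PORT A =====
-- inner loop: l.append(char) for punctuation, l.insert(0, char) otherwise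
def revWordA (w : List Char) : List Char :=
  w.foldl (fun l c => if pvPunct.contains c then l ++ [c] else c :: l) []

def reverse_each_word (sentence : String) : String :=
  String.ofList (PySem.Chars.join [' ']
    ((PySem.Chars.splitOn sentence.toList [' ']).foldl
      (fun acc w => acc ++ [revWordA w]) []))

-- ===== PORT B =====
def revWordB (w : List Char) : List Char :=
  (w.filter (fun c => !pvPunct.contains c)).reverse ++ w.filter (fun c => pvPunct.contains c)

def reverse_each_word_alt (sentence : String) : String :=
  String.ofList (PySem.Chars.join [' ']
    ((PySem.Chars.splitOn sentence.toList [' ']).map revWordB))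

-- ===== PRECONDITION & SPEC =====
def Spec_reverse_each_word (sentence : String) (out : String) : Prop := out = reverse_each_word_alt sentence
instance (sentence : String) (out : String) : Decidable (Spec_reverse_each_word sentence out) := by unfold Spec_reverse_each_word; infer_instance

-- ===== CLAIM (what is proved, stated in full; the proofs are below) =====
def Claim_equal_reverse_each_word : Prop := ∀ (sentence : String), Dom_reverse_each_word sentence → Spec_reverse_each_word sentence (reverse_each_word sentence)

-- ===== LEMMAS AND PROOFS =====
theorem revWordA_loop (w : List Char) (a b : List Char) :
    w.foldl (fun l c => if pvPunct.contains c then l ++ [c] else c :: l) (a ++ b)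
      = ((w.filter (fun c => !pvPunct.contains c)).reverse ++ a)
        ++ (b ++ w.filter (fun c => pvPunct.contains c)) := by
  induction w generalizing a b with
  | nil => simp
  | cons c w ih =>
    by_cases h : pvPunct.contains c = true
    · have h' : c ∈ pvPunct := by simpa using h
      rw [List.foldl_cons, if_pos h, List.append_assoc, ih a (b ++ [c])]
      simp [h', List.filter_cons, List.append_assoc]
    · have h' : c ∉ pvPunct := by simpa using h
      rw [List.foldl_cons, if_neg h, show c :: (a ++ b) = (c :: a) ++ b from rfl, ih (c :: a) b]
      simp [h', List.filter_cons, List.append_assoc]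

theorem revWordA_eq (w : List Char) : revWordA w = revWordB w := by
  have := revWordA_loop w [] []
  simpa [revWordA, revWordB] using this

-- ===== VERDICT (by name: the statement is the Claim_ definition above) =====
theorem reverse_each_word_spec : Claim_equal_reverse_each_word := by
  intro sentence _
  unfold Spec_reverse_each_word reverse_each_word reverse_each_word_alt
  rw [PySem.List.foldl_append_singleton_eq_map]
  simp only [List.map_congr_left (fun w _ => revWordA_eq w), List.nil_append]
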